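-- pv_equiv track=rewrite | github.com/Prash-2402/KAPP | backend/agents/project_agent.py | _get_quality_distribution
-- ===== SOURCE A (Python) =====
-- from typing import Dict, List
--
-- def _get_quality_distribution(projects: List[Dict]) -> Dict:
--     """Get distribution of project quality."""
--     excellent = sum(1 for p in projects if p['overall_quality'] >= 8)
--     good = sum(1 for p in projects if 6 <= p['overall_quality'] < 8)
--     average = sum(1 for p in projects if 4 <= p['overall_quality'] < 6)
--     below_avg = sum(1 for p in projects if p['overall_quality'] < 4)
--
--     return {
--         'excellent': excellent,  # 8-10
--         'good': good,  # 6-8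
--         'average': average,  # 4-6
--         'below_average': below_avg  # <4
--     }
-- ===== SOURCE B (Python) =====
-- from typing import Dict, List
--
-- def _get_quality_distribution(projects: List[Dict]) -> Dict:
--     """Get distribution of project quality (single pass)."""
--     excellent = good = average = below_avg = 0
--     for p in projects:
--         q = p['overall_quality']
--         if q >= 8:
--             excellent += 1
--         elif q >= 6:
--             good += 1
--         elif q >= 4:
--             average += 1
--         elif q < 4:
--             below_avg += 1
--     return {
--         'excellent': excellent,
--         'good': good,
--         'average': average,
--         'below_average': below_avg
--     }
-- ===== Notes on version B (the rewrite author's own statement) =====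
-- stated objective: simpler
-- what changed: Replaces four independent generator-sum passes over the project list with one loop maintaining four counters via an if/elif chain.
import Mathlib
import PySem

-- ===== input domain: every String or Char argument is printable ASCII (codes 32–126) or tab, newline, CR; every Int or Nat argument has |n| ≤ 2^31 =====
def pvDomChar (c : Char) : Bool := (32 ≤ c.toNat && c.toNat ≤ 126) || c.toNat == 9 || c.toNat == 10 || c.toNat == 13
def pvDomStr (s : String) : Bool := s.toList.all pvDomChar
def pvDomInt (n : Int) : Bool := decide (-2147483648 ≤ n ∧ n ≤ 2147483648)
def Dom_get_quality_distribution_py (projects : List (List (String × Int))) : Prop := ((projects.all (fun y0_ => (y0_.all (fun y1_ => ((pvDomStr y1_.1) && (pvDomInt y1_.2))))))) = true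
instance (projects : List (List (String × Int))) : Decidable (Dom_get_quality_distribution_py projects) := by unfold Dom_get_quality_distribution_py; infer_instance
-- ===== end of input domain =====

-- B replaces A's four independent counting passes by one loop with four counters (simpler).


-- ===== PORT A =====
-- p['overall_quality']: first-match lookup in the association list; Pre_ guarantees the key
-- is present, so getD 0 is never the fallback on admitted inputs.
def pvQual (p : List (String × Int)) : Int := ((PySem.Dict.mk p).get? "overall_quality").getD 0

def get_quality_distribution_py (projects : List (List (String × Int))) : List (String × Int) :=
  let excellent := projects.foldl (fun acc p => if pvQual p ≥ 8 then acc + 1 else acc) (0 : Int)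
  let good := projects.foldl (fun acc p => if 6 ≤ pvQual p ∧ pvQual p < 8 then acc + 1 else acc) (0 : Int)
  let average := projects.foldl (fun acc p => if 4 ≤ pvQual p ∧ pvQual p < 6 then acc + 1 else acc) (0 : Int)
  let below_avg := projects.foldl (fun acc p => if pvQual p < 4 then acc + 1 else acc) (0 : Int)
  [("excellent", excellent), ("good", good), ("average", average), ("below_average", below_avg)]

-- ===== PORT B =====
def get_quality_distribution_py_alt (projects : List (List (String × Int))) : List (String × Int) :=
  let r := projects.foldl
    (fun (s : Int × Int × Int × Int) p =>
      let q := pvQual p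
      if q ≥ 8 then (s.1 + 1, s.2.1, s.2.2.1, s.2.2.2)
      else if q ≥ 6 then (s.1, s.2.1 + 1, s.2.2.1, s.2.2.2)
      else if q ≥ 4 then (s.1, s.2.1, s.2.2.1 + 1, s.2.2.2)
      else if q < 4 then (s.1, s.2.1, s.2.2.1, s.2.2.2 + 1)
      else s)
    (0, 0, 0, 0)
  [("excellent", r.1), ("good", r.2.1), ("average", r.2.2.1), ("below_average", r.2.2.2)]

-- ===== PRECONDITION & SPEC =====
-- Pre_: every project dict contains the key 'overall_quality' (A raises KeyError otherwise).
def Pre_get_quality_distribution_py (projects : List (List (String × Int))) : Prop :=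
  ∀ p ∈ projects, ((PySem.Dict.mk p).get? "overall_quality").isSome
instance (projects : List (List (String × Int))) : Decidable (Pre_get_quality_distribution_py projects) := by unfold Pre_get_quality_distribution_py; infer_instance
def pvWitness_get_quality_distribution_py : (List (List (String × Int))) := [[("overall_quality", 7)], [("overall_quality", 2)]]

def Spec_get_quality_distribution_py (projects : List (List (String × Int))) (out : List (String × Int)) : Prop := out = get_quality_distribution_py_alt projects
instance (projects : List (List (String × Int))) (out : List (String × Int)) : Decidable (Spec_get_quality_distribution_py projects out) := by unfold Spec_get_quality_distribution_py; infer_instance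

-- ===== CLAIM (what is proved, stated in full; the proofs are below) =====
def Claim_equal_get_quality_distribution_py : Prop := ∀ (projects : List (List (String × Int))), Dom_get_quality_distribution_py projects → Pre_get_quality_distribution_py projects → Spec_get_quality_distribution_py projects (get_quality_distribution_py projects)

-- ===== LEMMAS AND PROOFS =====
-- shift lemma for A's counting folds
theorem pvCnt_shift (cond : List (String × Int) → Prop) [DecidablePred cond] (ps : List (List (String × Int))) (c : Int) :
    ps.foldl (fun acc p => if cond p then acc + 1 else acc) c
      = c + ps.foldl (fun acc p => if cond p then acc + 1 else acc) 0 := by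
  induction ps generalizing c with
  | nil => simp
  | cons p t ih =>
    simp only [List.foldl_cons]
    rw [ih (if cond p then c + 1 else c), ih (if cond p then (0:Int) + 1 else 0)]
    split <;> ring


theorem pvLoopB (ps : List (List (String × Int))) (e g a b : Int) :
    ps.foldl
      (fun (s : Int × Int × Int × Int) p =>
        let q := pvQual p
        if q ≥ 8 then (s.1 + 1, s.2.1, s.2.2.1, s.2.2.2)
        else if q ≥ 6 then (s.1, s.2.1 + 1, s.2.2.1, s.2.2.2)
        else if q ≥ 4 then (s.1, s.2.1, s.2.2.1 + 1, s.2.2.2)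
        else if q < 4 then (s.1, s.2.1, s.2.2.1, s.2.2.2 + 1)
        else s)
      (e, g, a, b)
      = (e + ps.foldl (fun acc p => if pvQual p ≥ 8 then acc + 1 else acc) 0,
         g + ps.foldl (fun acc p => if 6 ≤ pvQual p ∧ pvQual p < 8 then acc + 1 else acc) 0,
         a + ps.foldl (fun acc p => if 4 ≤ pvQual p ∧ pvQual p < 6 then acc + 1 else acc) 0,
         b + ps.foldl (fun acc p => if pvQual p < 4 then acc + 1 else acc) 0) := by
  induction ps generalizing e g a b with
  | nil => simp
  | cons p t ih =>
    simp only [List.foldl_cons]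
    rw [ih]
    split_ifs <;>
      (try rw [pvCnt_shift (fun p => pvQual p ≥ 8) t ((0:Int)+1)]) <;>
      (try rw [pvCnt_shift (fun p => 6 ≤ pvQual p ∧ pvQual p < 8) t ((0:Int)+1)]) <;>
      (try rw [pvCnt_shift (fun p => 4 ≤ pvQual p ∧ pvQual p < 6) t ((0:Int)+1)]) <;>
      (try rw [pvCnt_shift (fun p => pvQual p < 4) t ((0:Int)+1)]) <;>
      simp only [Prod.mk.injEq] <;>
      first
        | (exfalso; omega)
        | (and_intros <;> first | trivial | ring)

-- ===== VERDICT (by name: the statement is the Claim_ definition above) =====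
theorem get_quality_distribution_py_spec : Claim_equal_get_quality_distribution_py := by
  intro projects _ _
  unfold Spec_get_quality_distribution_py get_quality_distribution_py get_quality_distribution_py_alt
  rw [pvLoopB]
  simp
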